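-- pv_equiv track=rewrite | github.com/lylla318/Python_Assignments | Word Puzzles/a4.py | match_helper
-- ===== SOURCE A (Python) =====
-- def autocomplete(prefix, pmap):
--     """Returns the list of all words that complete prefix in pmap
--
--     If there are no words completing prefix in pmap, this function returns the
--     empty list.
--
--     Example: If pmap is the prefix map created from 'short.txt', then
--     autocomplete('th',pmap) returns the list ['the', 'that'].
--     Similarly, autocomplete('x',pmap) returns the empty list []
--
--     Precondition: prefix is a string that is either empty or has only letters.
--     pmap is a prefix map.
--
--     Enforced Preconditions: We enforce the preconditions for prefix, but only
--     enforce that pmap is a dict."""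
--     # This function will require recursion combined with a for-loop.  The base
--     # case is when prefix is not in the prefix map.  Otherwise, you will need
--     # to process all of the values in the list pmap[prefix].
--
--     # Be careful with pmap[prefix]. If prefix is an actual word then '' is in this
--     # list.  If you are not careful with your recursive call, then you will find
--     # yourself in an infinite recursion. (if only thing after prefix is empty string, just return that value (''))
--
--     # NOTE: This function MUST be recurse, and you are not allowed to add any
--     # helper functions to implement this function.
--
--     assert (type(prefix)==str or prefix.isalpha()), str(prefix) + 'is not valid string'
--     assert (type(pmap)==dict), str(pmap) + 'is not a dictionary'
--
--     if not prefix in pmap: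
--         word_list = []
--         return word_list
--
--
--     word_list = []
--
--     list_letters = pmap[prefix]
--     list_letters2 = []
--
--     if pmap[prefix] == ['']:
--         return [prefix]
--
--     for letter in list_letters:
--         if letter == '':
--             word_list = word_list + [prefix]
--         else:
--             word_list = autocomplete(prefix+letter, pmap) + word_list
--
--     return word_list
--
-- def match_helper(prefix,template,pmap):
--     """Returns the list of all valid words that start with the given prefix, and
--     whose remaining letters match the given template.
--
--     Unlike match, the template in this case is not supposed to match the whole
--     string. It is only supposed to match the remaining part of the string after
--     the prefix.
--
--     Example: If pmap is the prefix map created from 'short.txt', then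
--     match_helper('i','?',pmap) returns ['in', 'it'].
--
--     Precondition: prefix is a string of letters or empty. template is either empty or
--     string of letters and '?'. pmap is a prefix map.
--
--     Enforced Precondition: prefix is a string of letters or empty. template is a string.
--     pmap is a dict."""
--     # This function is to be implemented recursively using a process that is similar
--     # to, but not the same as scrabble.  At each recursive call, you will remove
--     # the first element from template.  If it is a letter, you add it to the prefix.
--     # If it is a '?', you must try each valid extension of the prefix.
--
--     # There are two base cases: when there are no word that complete the prefix, and
--     # when the template is empty.  In that second case, what you do depends on whether
--     # or not prefix is a word.
--
--     assert (type(prefix)==str or prefix.isalpha()), str(prefix) + 'is not valid string'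
--     assert (type(template)==str), str(template) + 'is not a string'
--     assert (type(pmap)==dict), str(pmap) + 'is not a dictionary'
--
--     if autocomplete(prefix,pmap)==[]:
--         return []
--
--     if template == '':
--         if prefix in autocomplete(prefix,pmap):
--             return [prefix]
--         else:
--             return []
--
--     wordlist = []
--
--     if template[0].isalpha():
--             wordlist = wordlist+ match_helper(prefix+template[0],template[1:],pmap)
--     else:
--         for value in pmap[prefix]:
--             wordlist = wordlist+ match_helper(prefix+value,template[1:],pmap)
--
--     return wordlist
-- ===== SOURCE B (Python) =====
-- def autocomplete(prefix, pmap):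
--     assert (type(prefix)==str or prefix.isalpha()), str(prefix) + 'is not valid string'
--     assert (type(pmap)==dict), str(pmap) + 'is not a dictionary'
--     if not prefix in pmap:
--         return []
--     word_list = []
--     list_letters = pmap[prefix]
--     if pmap[prefix] == ['']:
--         return [prefix]
--     for letter in list_letters:
--         if letter == '':
--             word_list = word_list + [prefix]
--         else:
--             word_list = autocomplete(prefix+letter, pmap) + word_list
--     return word_list
--
-- def match_helper(prefix, template, pmap):
--     assert (type(prefix)==str or prefix.isalpha()), str(prefix) + 'is not valid string'
--     assert (type(template)==str), str(template) + 'is not a string'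
--     assert (type(pmap)==dict), str(pmap) + 'is not a dictionary'
--     frontier = [prefix]
--     for ch in template:
--         frontier = [p for p in frontier if autocomplete(p, pmap) != []]
--         if ch.isalpha():
--             frontier = [p + ch for p in frontier]
--         else:
--             frontier = [p + v for p in frontier for v in pmap[p]]
--     return [p for p in frontier if p in autocomplete(p, pmap)]
-- ===== Notes on version B (the rewrite author's own statement) =====
-- stated objective: alternative
-- what changed: Replaced A's preorder recursion on the template (one recursive call per frontier node) by an iterative level-by-level loop that consumes one template character per iteration while maintaining a frontier list of candidate prefixes (pruned by autocomplete each level), keeping the autocomplete helper unchanged.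
import Mathlib
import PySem

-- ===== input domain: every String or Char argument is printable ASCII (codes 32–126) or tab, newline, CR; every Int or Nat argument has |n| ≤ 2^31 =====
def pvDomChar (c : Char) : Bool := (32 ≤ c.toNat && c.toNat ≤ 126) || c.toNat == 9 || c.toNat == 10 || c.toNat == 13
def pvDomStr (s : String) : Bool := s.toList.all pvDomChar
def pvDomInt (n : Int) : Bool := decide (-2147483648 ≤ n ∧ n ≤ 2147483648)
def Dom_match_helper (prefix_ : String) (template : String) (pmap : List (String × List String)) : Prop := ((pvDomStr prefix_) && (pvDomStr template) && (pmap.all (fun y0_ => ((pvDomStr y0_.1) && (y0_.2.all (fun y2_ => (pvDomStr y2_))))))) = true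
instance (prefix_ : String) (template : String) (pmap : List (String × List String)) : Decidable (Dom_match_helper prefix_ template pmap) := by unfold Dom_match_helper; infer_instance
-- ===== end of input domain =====

-- B replaces A's preorder recursion over the template by an iterative level-by-level
-- traversal of a frontier of candidate prefixes (same values, same order; objective: alternative).

-- ===== PORT A =====
-- shared helper `autocomplete` (identical in Source A and Source B), ported with fuel:
-- the Python recursion only descends on keys of pmap with a strictly longer prefix,
-- so a fuel of (longest key length + 2) is never exhausted.
def pvMaxKeyLen (pmap : List (String × List String)) : Nat :=
  pmap.foldl (fun m kv => max m (PySem.Str.len kv.1).toNat) 0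

def autoF (pmap : List (String × List String)) : Nat → String → List String
  | 0, _ => []
  | n + 1, prefix_ =>
    match (PySem.Dict.mk pmap).get? prefix_ with
    | none => []              -- `if not prefix in pmap: return []`
    | some list_letters =>
      if list_letters = [""] then [prefix_]
      else
        list_letters.foldl
          (fun word_list letter =>
            if letter = "" then word_list ++ [prefix_]
            else autoF pmap n (prefix_ ++ letter) ++ word_list) []

def autocomplete (prefix_ : String) (pmap : List (String × List String)) : List String :=
  autoF pmap (pvMaxKeyLen pmap + 2) prefix_

-- A's match_helper, structural recursion on the template's characters
def matchGo (pmap : List (String × List String)) : String → List Char → List String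
  | prefix_, t =>
    if autocomplete prefix_ pmap = [] then []
    else
      match t with
      | [] => if prefix_ ∈ autocomplete prefix_ pmap then [prefix_] else []
      | c :: rest =>
        if PySem.Chars.isalpha c then
          [] ++ matchGo pmap (prefix_.push c) rest
        else
          (((PySem.Dict.mk pmap).get? prefix_).getD []).foldl
            (fun wordlist value => wordlist ++ matchGo pmap (prefix_ ++ value) rest) []
termination_by _ t => t.length
decreasing_by all_goals simp

def match_helper (prefix_ : String) (template : String) (pmap : List (String × List String)) : List String :=
  matchGo pmap prefix_ template.toList

-- ===== PORT B =====
-- iterative frontier (level-by-level) traversal, from Source B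
def levelGo (pmap : List (String × List String)) : List Char → List String → List String
  | [], frontier => frontier.filter (fun p => decide (p ∈ autocomplete p pmap))
  | c :: rest, frontier =>
    let fr := frontier.filter (fun p => decide (autocomplete p pmap ≠ []))
    if PySem.Chars.isalpha c then
      levelGo pmap rest (fr.map (fun p => p.push c))
    else
      levelGo pmap rest
        (fr.flatMap (fun p => (((PySem.Dict.mk pmap).get? p).getD []).map (fun v => p ++ v)))

def match_helper_alt (prefix_ : String) (template : String) (pmap : List (String × List String)) : List String :=
  levelGo pmap template.toList [prefix_]

-- ===== PRECONDITION & SPEC =====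
def Spec_match_helper (prefix_ : String) (template : String) (pmap : List (String × List String)) (out : List String) : Prop := out = match_helper_alt prefix_ template pmap
instance (prefix_ : String) (template : String) (pmap : List (String × List String)) (out : List String) : Decidable (Spec_match_helper prefix_ template pmap out) := by unfold Spec_match_helper; infer_instance

-- ===== CLAIM (what is proved, stated in full; the proofs are below) =====
def Claim_equal_match_helper : Prop := ∀ (prefix_ : String) (template : String) (pmap : List (String × List String)), Dom_match_helper prefix_ template pmap → Spec_match_helper prefix_ template pmap (match_helper prefix_ template pmap)

-- ===== LEMMAS AND PROOFS =====
theorem matchGo_nil (pmap : List (String × List String)) (p : String) :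
    matchGo pmap p [] =
      if autocomplete p pmap = [] then []
      else if p ∈ autocomplete p pmap then [p] else [] := by
  rw [matchGo]

theorem matchGo_cons (pmap : List (String × List String)) (p : String) (c : Char) (rest : List Char) :
    matchGo pmap p (c :: rest) =
      if autocomplete p pmap = [] then []
      else if PySem.Chars.isalpha c then matchGo pmap (p.push c) rest
      else (((PySem.Dict.mk pmap).get? p).getD []).flatMap
        (fun v => matchGo pmap (p ++ v) rest) := by
  rw [matchGo, PySem.List.foldl_append_eq_flatMap]
  simp

theorem flatMap_filter_if {α β : Type} (q : α → Bool) (h : α → List β) (F : List α) :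
    (F.filter q).flatMap h = F.flatMap (fun p => if q p then h p else []) := by
  induction F with
  | nil => rfl
  | cons a F ih => by_cases hq : q a <;> simp [hq, ih]

theorem flatMap_if_singleton {α : Type} (q : α → Bool) (F : List α) :
    F.flatMap (fun p => if q p then [p] else []) = F.filter q := by
  induction F with
  | nil => rfl
  | cons a F ih => by_cases hq : q a <;> simp [hq, ih]

-- the level-order loop over a frontier computes the concatenation of A's preorder results
theorem levelGo_eq_flatMap (pmap : List (String × List String)) (t : List Char) :
    ∀ F : List String, levelGo pmap t F = F.flatMap (fun p => matchGo pmap p t) := by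
  induction t with
  | nil =>
    intro F
    rw [levelGo, ← flatMap_if_singleton]
    refine (List.flatMap_congr fun p _ => ?_).symm
    rw [matchGo_nil]
    by_cases hA : autocomplete p pmap = []
    · have hm : p ∉ autocomplete p pmap := by simp [hA]
      simp [hA]
    · by_cases hm : p ∈ autocomplete p pmap <;> simp [hA]
  | cons c rest ih =>
    intro F
    rw [levelGo]
    by_cases hc : PySem.Chars.isalpha c
    · simp only [hc]
      rw [ih, List.flatMap_map, flatMap_filter_if]
      refine List.flatMap_congr fun p _ => ?_
      rw [matchGo_cons]
      by_cases hA : autocomplete p pmap = [] <;> simp [hA, hc]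
    · simp only [hc, Bool.false_eq_true, if_false]
      rw [ih, List.flatMap_assoc, flatMap_filter_if]
      refine List.flatMap_congr fun p _ => ?_
      rw [matchGo_cons, List.flatMap_map]
      by_cases hA : autocomplete p pmap = [] <;> simp [hA, hc]

-- ===== VERDICT (by name: the statement is the Claim_ definition above) =====
theorem match_helper_spec : Claim_equal_match_helper := by
  intro prefix_ template pmap _
  show match_helper prefix_ template pmap = match_helper_alt prefix_ template pmap
  rw [match_helper, match_helper_alt, levelGo_eq_flatMap]
  simp
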